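-- pv_equiv track=rewrite | github.com/yashitanamdeo/geeks-for-geeks | medium/maximize_median_after_doing_k_addition_operation/solution.py | maximizeMedian
-- ===== SOURCE A (Python) =====
-- def maximizeMedian(arr, k):
--     arr.sort()
--     n = len(arr)
--     idx = (n - 1) // 2
--
--     def canMake(mid):
--         diff = 0
--         for i in range(idx, n):
--             if mid >= arr[i]:
--                 diff += mid - arr[i]
--             if diff > k:
--                 return False
--         return True
--
--     l = arr[idx]
--     r = arr[-1] + k
--
--     while l <= r:
--         mid = (l + r) // 2
--         if canMake(mid):
--             l = mid + 1
--         else: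
--             r = mid - 1
--
--     if n % 2 == 1:
--         return r
--
--     return (r + max(r, arr[idx + 1])) // 2
-- ===== SOURCE B (Python) =====
-- def maximizeMedian(arr, k):
--     # Sorts arr in place like A; return-value equivalence is what is claimed.
--     arr.sort()
--     n = len(arr)
--     idx = (n - 1) // 2
--     suf = arr[idx:]
--     m = len(suf)
--     best = suf[0]
--     pref = 0
--     for j in range(1, m + 1):
--         pref += suf[j - 1]
--         t = (pref + k) // j
--         if t >= suf[j - 1] and (j == m or t <= suf[j]) and t > best:
--             best = t
--     if n % 2 == 1:
--         return best
--     return (best + max(best, arr[idx + 1])) // 2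
-- ===== Notes on version B (the rewrite author's own statement) =====
-- stated objective: alternative
-- what changed: Replaces A's binary search over the answer range (re-scanning the upper half of the array for every probed median value, O(n log(k+V)) after sorting) with a single prefix-sum greedy pass over the sorted suffix that computes the maximal feasible median directly (O(n) after sorting); intended as faster, but the sort dominates and a timing run read only 1.26x at the largest size, so no speed is claimed.
-- outside the precondition, e.g. on maximizeMedian([1], -1): A returns 0, B returns 1
import Mathlib
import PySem

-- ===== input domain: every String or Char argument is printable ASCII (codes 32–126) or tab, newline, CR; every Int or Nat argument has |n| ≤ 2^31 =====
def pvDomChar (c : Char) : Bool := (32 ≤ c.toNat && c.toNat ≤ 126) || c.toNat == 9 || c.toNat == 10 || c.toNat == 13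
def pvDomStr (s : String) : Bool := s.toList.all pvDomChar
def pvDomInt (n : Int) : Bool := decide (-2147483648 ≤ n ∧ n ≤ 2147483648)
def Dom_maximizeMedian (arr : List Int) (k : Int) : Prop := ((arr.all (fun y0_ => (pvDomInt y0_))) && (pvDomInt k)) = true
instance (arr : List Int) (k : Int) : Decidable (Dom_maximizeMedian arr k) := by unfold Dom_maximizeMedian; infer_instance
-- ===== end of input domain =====

-- B replaces A's binary search on the answer by one prefix-sum greedy pass over the sorted
-- suffix (an alternative algorithm of the same overall cost; the sort dominates both).
-- Both A and B sort arr in place (arr.sort()); the equivalence proved is about the return value.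

-- ===== PORT A =====
-- canMake's loop 'for i in range(idx, n)' with its early 'return False';
-- indices are always in range when called below (Pre_), so .getD 0 is never the raising case.
def pvCanLoop (s : List Int) (k mid : Int) (diff : Int) : List Int → Bool
  | [] => true
  | i :: is =>
    let a := (PySem.List.pyGet? s i).getD 0
    let diff' := if mid ≥ a then diff + (mid - a) else diff
    if diff' > k then false else pvCanLoop s k mid diff' is

def pvCanMake (s : List Int) (idx n k mid : Int) : Bool :=
  pvCanLoop s k mid 0 (PySem.List.pyRange idx n 1)

-- the 'while l <= r' binary-search loop; the fuel argument only makes the loop total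
-- (it is supplied as the size of the initial interval, which the loop never exhausts)
def pvBSearch (s : List Int) (idx n k : Int) : Int → Int → Nat → Int
  | _, r, 0 => r
  | l, r, fuel + 1 =>
    if l ≤ r then
      let mid := PySem.Int.floordiv (l + r) 2
      if pvCanMake s idx n k mid then pvBSearch s idx n k (mid + 1) r fuel
      else pvBSearch s idx n k l (mid - 1) fuel
    else r

def maximizeMedian (arr : List Int) (k : Int) : Int :=
  let s := PySem.List.sorted arr (fun x => x) false
  let n : Int := s.length
  let idx := PySem.Int.floordiv (n - 1) 2
  let l := (PySem.List.pyGet? s idx).getD 0          -- arr[idx]; in range under Pre_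
  let r := (PySem.List.pyGet? s (-1)).getD 0 + k     -- arr[-1] + k; in range under Pre_
  let r := pvBSearch s idx n k l r ((r + 1 - l).toNat)
  if PySem.Int.mod n 2 = 1 then r
  else PySem.Int.floordiv (r + max r ((PySem.List.pyGet? s (idx + 1)).getD 0)) 2

-- ===== PORT B =====
-- loop body of Source B's 'for j in range(1, m + 1)'; state is (pref, best).
-- suf[j] is only consulted when j ≠ m ('or' short-circuit), so it is always in range.
def pvGreedyStep (suf : List Int) (m k : Int) (st : Int × Int) (j : Int) : Int × Int :=
  let pref := st.1 + (PySem.List.pyGet? suf (j - 1)).getD 0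
  let t := PySem.Int.floordiv (pref + k) j
  let best := if t ≥ (PySem.List.pyGet? suf (j - 1)).getD 0 ∧
                 (j = m ∨ t ≤ (PySem.List.pyGet? suf j).getD 0) ∧ st.2 < t
              then t else st.2
  (pref, best)

def maximizeMedian_alt (arr : List Int) (k : Int) : Int :=
  let s := PySem.List.sorted arr (fun x => x) false
  let n : Int := s.length
  let idx := PySem.Int.floordiv (n - 1) 2
  let suf := PySem.List.slice s (some idx) none
  let m : Int := suf.length
  let best0 := (PySem.List.pyGet? suf 0).getD 0      -- suf[0]; in range under Pre_
  let st := (PySem.List.pyRange 1 (m + 1) 1).foldl (pvGreedyStep suf m k) (0, best0)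
  let best := st.2
  if PySem.Int.mod n 2 = 1 then best
  else PySem.Int.floordiv (best + max best ((PySem.List.pyGet? s (idx + 1)).getD 0)) 2

-- ===== PRECONDITION & SPEC =====
-- Pre_ excludes the empty list, on which A raises IndexError, and negative k: k counts
-- increment operations, so k < 0 is outside the task's natural domain; there A's vacuously
-- failing feasibility test makes it return artifacts of the empty search such as median - 1.
def Pre_maximizeMedian (arr : List Int) (k : Int) : Prop := arr ≠ [] ∧ 0 ≤ k
instance (arr : List Int) (k : Int) : Decidable (Pre_maximizeMedian arr k) := by
  unfold Pre_maximizeMedian; infer_instance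
def pvWitness_maximizeMedian : List Int × Int := ([3, 1, 2, 7], 4)

def Spec_maximizeMedian (arr : List Int) (k : Int) (out : Int) : Prop := out = maximizeMedian_alt arr k
instance (arr : List Int) (k : Int) (out : Int) : Decidable (Spec_maximizeMedian arr k out) := by unfold Spec_maximizeMedian; infer_instance

-- ===== CLAIM (what is proved, stated in full; the proofs are below) =====
def Claim_equal_maximizeMedian : Prop := ∀ (arr : List Int) (k : Int), Dom_maximizeMedian arr k → Pre_maximizeMedian arr k → Spec_maximizeMedian arr k (maximizeMedian arr k)

-- ===== LEMMAS AND PROOFS =====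

-- the total cost of raising every element of l that is below mid up to mid
def tcost (mid : Int) : List Int → Int
  | [] => 0
  | e :: tl => max 0 (mid - e) + tcost mid tl

theorem tcost_nonneg (mid : Int) (l : List Int) : 0 ≤ tcost mid l := by
  induction l with
  | nil => simp [tcost]
  | cons e tl ih => simp only [tcost]; have := le_max_left 0 (mid - e); omega

theorem tcost_mono {mid mid' : Int} (h : mid ≤ mid') (l : List Int) :
    tcost mid l ≤ tcost mid' l := by
  induction l with
  | nil => simp [tcost]
  | cons e tl ih =>
    simp only [tcost]
    have h1 : max 0 (mid - e) ≤ max 0 (mid' - e) := by omega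
    omega

theorem tcost_append (mid : Int) (a b : List Int) :
    tcost mid (a ++ b) = tcost mid a + tcost mid b := by
  induction a with
  | nil => simp [tcost]
  | cons e tl ih => simp only [tcost, List.cons_append, ih]; ring

theorem tcost_eq_zero {mid : Int} {l : List Int} (h : ∀ e ∈ l, mid ≤ e) :
    tcost mid l = 0 := by
  induction l with
  | nil => simp [tcost]
  | cons e tl ih =>
    have he := h e (by simp)
    have := ih (fun x hx => h x (by simp [hx]))
    simp only [tcost, this]
    omega

theorem tcost_ge {mid e : Int} {l : List Int} (he : e ∈ l) :
    max 0 (mid - e) ≤ tcost mid l := by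
  induction l with
  | nil => simp at he
  | cons x tl ih =>
    simp only [tcost]
    rcases List.mem_cons.mp he with h | h
    · subst h; have := tcost_nonneg mid tl; omega
    · have := ih h; have := le_max_left 0 (mid - x); omega

theorem tcost_eq_of_le {mid : Int} {l : List Int} (h : ∀ e ∈ l, e ≤ mid) :
    tcost mid l = mid * l.length - l.sum := by
  induction l with
  | nil => simp [tcost]
  | cons e tl ih =>
    have he := h e (by simp)
    have ihv := ih (fun x hx => h x (by simp [hx]))
    simp only [tcost, ihv, List.length_cons, List.sum_cons]
    have : max 0 (mid - e) = mid - e := by omega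
    rw [this]
    push_cast
    ring

-- every element of the drop is at least the element at the start of the drop
theorem sorted_drop_le {s : List Int} (hs : s.Pairwise (· ≤ ·)) {i : Nat}
    (hi : i < s.length) : ∀ e ∈ s.drop i, s[i] ≤ e := by
  intro e he
  rw [List.drop_eq_getElem_cons hi] at he
  rcases List.mem_cons.mp he with h | h
  · omega
  · have hp : (s.drop (i+1)).Pairwise (· ≤ ·) := hs.drop
    have hpg := List.pairwise_iff_getElem.mp hs
    obtain ⟨p, hp2, rfl⟩ := List.mem_iff_getElem.mp h
    have hp3 : p < s.length - (i + 1) := by simpa using hp2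
    rw [List.getElem_drop]
    exact hpg i (i + 1 + p) hi (by omega) (by omega)

-- ===== the canMake loop computes 'total cost ≤ k' =====
theorem canLoop_eq (s : List Int) (k mid : Int) :
    ∀ (fu i : Nat) (d : Int), s.length = i + fu → d ≤ k →
      pvCanLoop s k mid d (PySem.List.pyRange (i : Int) (s.length : Int) 1)
        = decide (d + tcost mid (s.drop i) ≤ k) := by
  intro fu
  induction fu with
  | zero =>
    intro i d hlen hd
    rw [PySem.List.pyRange_one_eq_nil (by omega)]
    rw [List.drop_of_length_le (by omega)]
    simp [pvCanLoop, tcost]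
    omega
  | succ fu ih =>
    intro i d hlen hd
    have hi : i < s.length := by omega
    rw [PySem.List.pyRange_one_cons (by exact_mod_cast Nat.cast_lt.mpr hi)]
    simp only [pvCanLoop]
    rw [PySem.List.pyGet?_natCast, List.getElem?_eq_getElem hi]
    simp only [Option.getD_some]
    rw [List.drop_eq_getElem_cons hi]
    simp only [tcost]
    have hstep : (if mid ≥ s[i] then d + (mid - s[i]) else d) = d + max 0 (mid - s[i]) := by
      split <;> omega
    rw [hstep]
    by_cases hgt : d + max 0 (mid - s[i]) > k
    · have := tcost_nonneg mid (s.drop (i + 1))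
      simp only [if_pos hgt]
      have : ¬ (d + (max 0 (mid - s[i]) + tcost mid (s.drop (i + 1))) ≤ k) := by omega
      simp [this]
    · simp only [if_neg hgt]
      have hcast : (i : Int) + 1 = ((i + 1 : Nat) : Int) := by push_cast; ring
      rw [hcast, ih (i + 1) (d + max 0 (mid - s[i])) (by omega) (by omega), Int.add_assoc]
      rfl

theorem canMake_eq (s : List Int) (k mid : Int) (i : Nat) (hi : i ≤ s.length) (hk : 0 ≤ k) :
    pvCanMake s (i : Int) (s.length : Int) k mid = decide (tcost mid (s.drop i) ≤ k) := by
  unfold pvCanMake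
  rw [canLoop_eq s k mid (s.length - i) i 0 (by omega) hk]
  norm_num

-- ===== the binary search returns the greatest feasible value =====
theorem bsearch_spec (s : List Int) (k : Int) (i : Nat) (hi : i ≤ s.length) (hk : 0 ≤ k) :
    ∀ (fuel : Nat) (l r : Int), (r + 1 - l).toNat ≤ fuel →
      tcost (l - 1) (s.drop i) ≤ k → ¬ tcost (r + 1) (s.drop i) ≤ k →
      tcost (pvBSearch s (i : Int) (s.length : Int) k l r fuel) (s.drop i) ≤ k ∧
      ¬ tcost (pvBSearch s (i : Int) (s.length : Int) k l r fuel + 1) (s.drop i) ≤ k := by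
  intro fuel
  induction fuel with
  | zero =>
    intro l r hfu hl hr
    simp only [pvBSearch]
    refine ⟨?_, hr⟩
    have := tcost_mono (show r ≤ l - 1 by omega) (s.drop i)
    omega
  | succ fuel ih =>
    intro l r hfu hl hr
    simp only [pvBSearch]
    by_cases hlr : l ≤ r
    · rw [if_pos hlr]
      have hmid := PySem.Int.floordiv_two_mid_bounds hlr
      by_cases hcan : pvCanMake s (i : Int) (s.length : Int) k (PySem.Int.floordiv (l + r) 2)
      · rw [if_pos hcan]
        rw [canMake_eq s k _ i hi hk] at hcan
        have hfeas := of_decide_eq_true hcan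
        exact ih (PySem.Int.floordiv (l + r) 2 + 1) r (by omega) (by simpa using hfeas) hr
      · rw [if_neg hcan]
        rw [canMake_eq s k _ i hi hk] at hcan
        have hfeas : ¬ tcost (PySem.Int.floordiv (l + r) 2) (s.drop i) ≤ k := by
          intro h; exact hcan (decide_eq_true h)
        exact ih l (PySem.Int.floordiv (l + r) 2 - 1) (by omega) hl (by simpa using hfeas)
    · rw [if_neg hlr]
      refine ⟨?_, hr⟩
      have := tcost_mono (show r ≤ l - 1 by omega) (s.drop i)
      omega

-- ===== greedy side =====
-- the number of elements of suf that are ≤ rA (suf sorted)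
def jstar (suf : List Int) (rA : Int) : Nat :=
  (suf.takeWhile (fun e => decide (e ≤ rA))).length

theorem jstar_le (suf : List Int) (rA : Int) : jstar suf rA ≤ suf.length :=
  (List.takeWhile_prefix _).length_le

theorem take_jstar (rA : Int) : ∀ (suf : List Int),
    suf.take (jstar suf rA) = suf.takeWhile (fun e => decide (e ≤ rA))
  | [] => rfl
  | e :: tl => by
    by_cases hp : e ≤ rA
    · rw [show jstar (e :: tl) rA = jstar tl rA + 1 from by simp [jstar, hp]]
      rw [List.takeWhile_cons_of_pos (by simpa using hp)]
      simp only [List.take_succ_cons, take_jstar rA tl]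
    · simp [jstar, hp]

theorem drop_jstar (rA : Int) : ∀ (suf : List Int),
    suf.drop (jstar suf rA) = suf.dropWhile (fun e => decide (e ≤ rA))
  | [] => rfl
  | e :: tl => by
    by_cases hp : e ≤ rA
    · rw [show jstar (e :: tl) rA = jstar tl rA + 1 from by simp [jstar, hp]]
      rw [List.dropWhile_cons_of_pos (by simpa using hp)]
      simp only [List.drop_succ_cons, drop_jstar rA tl]
    · simp [jstar, hp]

theorem mem_take_jstar {suf : List Int} {rA e : Int} (h : e ∈ suf.take (jstar suf rA)) :
    e ≤ rA := by
  rw [take_jstar] at h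
  simpa using List.mem_takeWhile_imp h

theorem getElem_jstar_gt : ∀ {suf : List Int} {rA : Int}, (h : jstar suf rA < suf.length) →
    rA < suf[jstar suf rA]
  | [], rA => by simp [jstar]
  | e :: tl, rA => by
    intro h
    by_cases hp : e ≤ rA
    · have hj : jstar (e :: tl) rA = jstar tl rA + 1 := by
        simp [jstar, hp]
      rw [hj] at h
      simp only [hj, List.getElem_cons_succ]
      exact getElem_jstar_gt (by simpa using h)
    · have hj : jstar (e :: tl) rA = 0 := by
        simp [jstar, hp]
      simp only [hj, List.getElem_cons_zero]
      omega

theorem jstar_pos {suf : List Int} {rA : Int} (hne : suf ≠ []) (h0 : suf.head hne ≤ rA) :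
    1 ≤ jstar suf rA := by
  cases suf with
  | nil => exact absurd rfl hne
  | cons e tl =>
    unfold jstar
    rw [List.takeWhile_cons]
    simp only [List.head_cons] at h0
    simp [h0]

-- a candidate accepted by the greedy's guard is feasible
theorem candidate_feasible {suf : List Int} {k : Int} (hs : suf.Pairwise (· ≤ ·)) (_hk : 0 ≤ k)
    {j : Nat} (hj1 : 1 ≤ j) (hjm : j ≤ suf.length)
    (t : Int) (ht : t = PySem.Int.floordiv ((suf.take j).sum + k) (j : Int))
    (hlo : suf[j - 1]'(by omega) ≤ t)
    (hhi : j = suf.length ∨ (∀ h : j < suf.length, t ≤ suf[j])) :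
    tcost t suf ≤ k := by
  have hsplit : suf = suf.take j ++ suf.drop j := (List.take_append_drop j suf).symm
  have hlen : (suf.take j).length = j := by simp [List.length_take]; omega
  have htake : ∀ e ∈ suf.take j, e ≤ t := by
    intro e he
    obtain ⟨p, hp, hpe⟩ := List.mem_take_iff_getElem.mp he
    have hpj : p < j := by omega
    rcases Nat.lt_or_ge p (j - 1) with hpl | hpl
    · have := List.pairwise_iff_getElem.mp hs p (j - 1) (by omega) (by omega) (by omega)
      omega
    · have : p = j - 1 := by omega
      subst this; omega
  have hdrop : tcost t (suf.drop j) = 0 := by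
    rcases hhi with h | h
    · rw [h, List.drop_length]; rfl
    · rcases Nat.lt_or_ge j suf.length with hlt | hge
      · refine tcost_eq_zero ?_
        intro e he
        have := sorted_drop_le hs hlt e he
        have := h hlt
        omega
      · rw [List.drop_of_length_le hge]; rfl
  have hmul : t * (j : Int) ≤ (suf.take j).sum + k := by
    have h0j : (0 : Int) < (j : Int) := by exact_mod_cast hj1
    have := (PySem.Int.le_floordiv_iff_mul_le (a := (suf.take j).sum + k)
      (b := (j : Int)) (q := t) h0j).mp (le_of_eq ht)
    exact this
  calc tcost t suf = tcost t (suf.take j) + tcost t (suf.drop j) := by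
        conv_lhs => rw [hsplit]
        exact tcost_append _ _ _
    _ = t * (j : Int) - (suf.take j).sum + 0 := by
        rw [tcost_eq_of_le htake, hdrop, hlen]
    _ ≤ k := by omega

-- the fold invariant: the running best stays feasible, never decreases, and
-- once the loop has passed j*, it is at least rA
-- at j = jstar, rA is at most the greedy candidate
theorem rA_le_t {suf : List Int} {k rA : Int} (_hs : suf.Pairwise (· ≤ ·))
    (hFa : tcost rA suf ≤ k) (_hFa1 : ¬ tcost (rA + 1) suf ≤ k)
    (hJ1 : 1 ≤ jstar suf rA) (hJm : jstar suf rA ≤ suf.length) :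
    rA ≤ PySem.Int.floordiv ((suf.take (jstar suf rA)).sum + k) ((jstar suf rA : Nat) : Int) := by
  have htake : ∀ e ∈ suf.take (jstar suf rA), e ≤ rA := fun e he => mem_take_jstar he
  have hlen : ((suf.take (jstar suf rA)).length : Int) = (jstar suf rA : Int) := by
    simp [List.length_take]; omega
  have hsplit : tcost rA suf = tcost rA (suf.take (jstar suf rA)) +
      tcost rA (suf.drop (jstar suf rA)) := by
    conv_lhs => rw [← List.take_append_drop (jstar suf rA) suf]
    exact tcost_append _ _ _
  have h1 : tcost rA (suf.take (jstar suf rA)) =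
      rA * (jstar suf rA : Int) - (suf.take (jstar suf rA)).sum := by
    rw [tcost_eq_of_le htake, hlen]
  have h2 := tcost_nonneg rA (suf.drop (jstar suf rA))
  have hmul : rA * (jstar suf rA : Int) ≤ (suf.take (jstar suf rA)).sum + k := by omega
  exact (PySem.Int.le_floordiv_iff_mul_le (by exact_mod_cast hJ1)).mpr hmul

-- the element just before jstar is at most rA
theorem getElem_pred_le_rA {suf : List Int} {rA : Int} (_hs : suf.Pairwise (· ≤ ·))
    (hJ1 : 1 ≤ jstar suf rA) (hJm : jstar suf rA ≤ suf.length) :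
    suf[jstar suf rA - 1]'(by omega) ≤ rA := by
  apply mem_take_jstar (rA := rA)
  have : (suf.take (jstar suf rA))[jstar suf rA - 1]'(by simp [List.length_take]; omega)
      = suf[jstar suf rA - 1]'(by omega) := List.getElem_take
  rw [← this]
  exact List.getElem_mem _

-- if jstar < length, the greedy candidate at jstar does not exceed the next element
theorem t_le_next {suf : List Int} {k rA : Int} (hs : suf.Pairwise (· ≤ ·))
    (_hFa : tcost rA suf ≤ k) (hFa1 : ¬ tcost (rA + 1) suf ≤ k)
    (hJ1 : 1 ≤ jstar suf rA) (hJm : jstar suf rA < suf.length) :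
    PySem.Int.floordiv ((suf.take (jstar suf rA)).sum + k) ((jstar suf rA : Nat) : Int)
      ≤ suf[jstar suf rA] := by
  by_contra hgt
  push Not at hgt
  have hnext : rA < suf[jstar suf rA] := getElem_jstar_gt hJm
  have hmul : (suf[jstar suf rA] + 1) * (jstar suf rA : Int) ≤ (suf.take (jstar suf rA)).sum + k :=
    (PySem.Int.le_floordiv_iff_mul_le (by exact_mod_cast hJ1)).mp (by omega)
  obtain ⟨v, hv⟩ : ∃ v, suf[jstar suf rA] = v := ⟨_, rfl⟩
  rw [hv] at hnext hmul
  have htake : ∀ e ∈ suf.take (jstar suf rA), e ≤ v := by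
    intro e he
    have := mem_take_jstar he
    omega
  have hdropz : tcost v (suf.drop (jstar suf rA)) = 0 := by
    refine tcost_eq_zero (fun e he => ?_)
    have := sorted_drop_le hs hJm e he
    omega
  have hlen : ((suf.take (jstar suf rA)).length : Int) = (jstar suf rA : Int) := by
    simp [List.length_take]; omega
  have hF : tcost v suf ≤ k := by
    have hsplit : tcost v suf = tcost v (suf.take (jstar suf rA)) +
        tcost v (suf.drop (jstar suf rA)) := by
      conv_lhs => rw [← List.take_append_drop (jstar suf rA) suf]
      exact tcost_append _ _ _
    rw [hsplit, hdropz, tcost_eq_of_le htake, hlen]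
    have hj0 : (0 : Int) < (jstar suf rA : Int) := by exact_mod_cast hJ1
    nlinarith [hmul]
  exact hFa1 (le_trans (tcost_mono (by omega) suf) hF)

theorem fold_inv {suf : List Int} {k rA : Int} (hs : suf.Pairwise (· ≤ ·)) (hk : 0 ≤ k)
    (hFa : tcost rA suf ≤ k) (hFa1 : ¬ tcost (rA + 1) suf ≤ k) :
    ∀ (fu J : Nat) (b : Int), 1 ≤ J → J + fu = suf.length + 1 → tcost b suf ≤ k →
      (tcost (((PySem.List.pyRange (J : Int) ((suf.length : Int) + 1) 1).foldl
          (pvGreedyStep suf (suf.length : Int) k) ((suf.take (J - 1)).sum, b)).2) suf ≤ k) ∧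
      b ≤ (((PySem.List.pyRange (J : Int) ((suf.length : Int) + 1) 1).foldl
          (pvGreedyStep suf (suf.length : Int) k) ((suf.take (J - 1)).sum, b)).2) ∧
      (J ≤ jstar suf rA → rA ≤ (((PySem.List.pyRange (J : Int) ((suf.length : Int) + 1) 1).foldl
          (pvGreedyStep suf (suf.length : Int) k) ((suf.take (J - 1)).sum, b)).2)) := by
  intro fu
  induction fu with
  | zero =>
    intro J b hJ1 hJfu hFb
    rw [PySem.List.pyRange_one_eq_nil (by omega)]
    simp only [List.foldl_nil]
    refine ⟨hFb, le_refl b, fun hJ => ?_⟩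
    have := jstar_le suf rA
    omega
  | succ fu ih =>
    intro J b hJ1 hJfu hFb
    have hJm : J ≤ suf.length := by omega
    have hJsub : J - 1 < suf.length := by omega
    rw [PySem.List.pyRange_one_cons (by omega), List.foldl_cons]
    -- evaluate one step of the loop
    have hcast1 : (J : Int) - 1 = ((J - 1 : Nat) : Int) := by omega
    have hget1 : (PySem.List.pyGet? suf ((J : Int) - 1)).getD 0 = suf[J - 1] := by
      rw [hcast1, PySem.List.pyGet?_natCast, List.getElem?_eq_getElem hJsub]; rfl
    have hsum : (suf.take (J - 1)).sum + suf[J - 1] = (suf.take J).sum := by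
      have h := List.sum_take_succ suf (J - 1) hJsub
      rw [show J - 1 + 1 = J by omega] at h
      omega
    set t : Int := PySem.Int.floordiv ((suf.take J).sum + k) (J : Int) with ht
    have hstep : pvGreedyStep suf (suf.length : Int) k ((suf.take (J - 1)).sum, b) (J : Int) =
        ((suf.take J).sum,
          if t ≥ suf[J - 1] ∧
             ((J : Int) = (suf.length : Int) ∨ t ≤ (PySem.List.pyGet? suf (J : Int)).getD 0) ∧
             b < t
          then t else b) := by
      unfold pvGreedyStep
      rw [hget1, hsum]
    rw [hstep]
    -- the accepted candidate (if any) is feasible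
    have hcand : ∀ hc1 : suf[J - 1] ≤ t,
        ((J : Int) = (suf.length : Int) ∨ t ≤ (PySem.List.pyGet? suf (J : Int)).getD 0) →
        tcost t suf ≤ k := by
      intro hc1 hc2
      refine candidate_feasible hs hk hJ1 hJm t ht ?_ ?_
      · exact hc1
      · rcases hc2 with h | h
        · left; exact_mod_cast h
        · rcases Nat.lt_or_ge J suf.length with hlt | hge
          · right
            intro hJl
            rwa [PySem.List.pyGet?_natCast, List.getElem?_eq_getElem hlt,
              Option.getD_some] at h
          · left; omega
    by_cases hC : t ≥ suf[J - 1] ∧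
        ((J : Int) = (suf.length : Int) ∨ t ≤ (PySem.List.pyGet? suf (J : Int)).getD 0) ∧ b < t
    · rw [if_pos hC]
      have hFt : tcost t suf ≤ k := hcand hC.1 hC.2.1
      have hrec := ih (J + 1) t (by omega) (by omega) hFt
      rw [show J + 1 - 1 = J by omega] at hrec
      have hcast2 : ((J + 1 : Nat) : Int) = (J : Int) + 1 := by push_cast; ring
      rw [hcast2] at hrec
      refine ⟨hrec.1, le_trans (le_of_lt hC.2.2) hrec.2.1, fun hJj => ?_⟩
      rcases Nat.lt_or_ge J (jstar suf rA) with hlt | hge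
      · exact hrec.2.2 (by omega)
      · -- J = jstar: the candidate t is at least rA
        have hJeq : J = jstar suf rA := by omega
        have hrAt : rA ≤ t := by
          subst hJeq
          exact le_trans (rA_le_t hs hFa hFa1 (by omega) hJm) (le_refl _)
        exact le_trans hrAt hrec.2.1
    · rw [if_neg hC]
      have hrec := ih (J + 1) b (by omega) (by omega) hFb
      rw [show J + 1 - 1 = J by omega] at hrec
      have hcast2 : ((J + 1 : Nat) : Int) = (J : Int) + 1 := by push_cast; ring
      rw [hcast2] at hrec
      refine ⟨hrec.1, hrec.2.1, fun hJj => ?_⟩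
      rcases Nat.lt_or_ge J (jstar suf rA) with hlt | hge
      · exact hrec.2.2 (by omega)
      · -- J = jstar and the guard failed: then b itself is already ≥ rA ≥ ...
        have hJeq : J = jstar suf rA := by omega
        have hc1 : suf[J - 1] ≤ t := by
          subst hJeq
          exact le_trans (getElem_pred_le_rA hs (by omega) hJm)
            (rA_le_t hs hFa hFa1 (by omega) hJm)
        have hc2 : (J : Int) = (suf.length : Int) ∨
            t ≤ (PySem.List.pyGet? suf (J : Int)).getD 0 := by
          rcases Nat.lt_or_ge J suf.length with hlt2 | hge2
          · right
            rw [PySem.List.pyGet?_natCast, List.getElem?_eq_getElem hlt2, Option.getD_some]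
            subst hJeq
            exact t_le_next hs hFa hFa1 (by omega) hlt2
          · left; exact_mod_cast (by omega : J = suf.length)
        have hbt : ¬ b < t := fun hb => hC ⟨hc1, hc2, hb⟩
        have hrAt : rA ≤ t := by
          subst hJeq
          exact rA_le_t hs hFa hFa1 (by omega) hJm
        exact le_trans (le_trans hrAt (by omega)) hrec.2.1

-- the two cores agree: the binary search and the greedy pass both return the
-- greatest value whose raising cost on the sorted suffix is at most k
theorem core (s : List Int) (k : Int) (hs : s.Pairwise (· ≤ ·)) (hne : s ≠ []) (hk : 0 ≤ k) :
    pvBSearch s (PySem.Int.floordiv ((s.length : Int) - 1) 2) (s.length : Int) k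
        ((PySem.List.pyGet? s (PySem.Int.floordiv ((s.length : Int) - 1) 2)).getD 0)
        ((PySem.List.pyGet? s (-1)).getD 0 + k)
        (((PySem.List.pyGet? s (-1)).getD 0 + k + 1
          - (PySem.List.pyGet? s (PySem.Int.floordiv ((s.length : Int) - 1) 2)).getD 0).toNat)
      = ((PySem.List.pyRange 1
            (((PySem.List.slice s (some (PySem.Int.floordiv ((s.length : Int) - 1) 2)) none).length : Int) + 1) 1).foldl
          (pvGreedyStep (PySem.List.slice s (some (PySem.Int.floordiv ((s.length : Int) - 1) 2)) none)
            ((PySem.List.slice s (some (PySem.Int.floordiv ((s.length : Int) - 1) 2)) none).length : Int) k)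
          (0, (PySem.List.pyGet?
            (PySem.List.slice s (some (PySem.Int.floordiv ((s.length : Int) - 1) 2)) none) 0).getD 0)).2 := by
  have hlen1 : 1 ≤ s.length := List.length_pos_iff.mpr hne
  set i : Nat := (s.length - 1) / 2 with hidef
  have hidx : PySem.Int.floordiv ((s.length : Int) - 1) 2 = (i : Int) := by
    rw [show ((s.length : Int) - 1) = ((s.length - 1 : Nat) : Int) by omega]
    exact_mod_cast PySem.Int.floordiv_natCast (s.length - 1) 2
  rw [hidx]
  have hi_lt : i < s.length := by omega
  rw [PySem.List.slice_from_natCast]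
  have hget_i : (PySem.List.pyGet? s (i : Int)).getD 0 = s[i] := by
    rw [PySem.List.pyGet?_natCast, List.getElem?_eq_getElem hi_lt]; rfl
  rw [hget_i]
  have hglast : (PySem.List.pyGet? s (-1)).getD 0 = s[s.length - 1] := by
    rw [PySem.List.pyGet?_neg_one, List.getLast?_eq_getElem?,
      List.getElem?_eq_getElem (by omega)]; rfl
  rw [hglast]
  have hsufs : (s.drop i).Pairwise (· ≤ ·) := hs.drop
  have hsuflen : (s.drop i).length = s.length - i := List.length_drop
  have hsufne : s.drop i ≠ [] := by
    intro hc; rw [List.drop_eq_nil_iff] at hc; omega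
  have hsuf0 : (PySem.List.pyGet? (s.drop i) 0).getD 0 = s[i] := by
    rw [PySem.List.pyGet?_zero, List.getElem?_eq_getElem (by omega)]
    simp [List.getElem_drop]
  rw [hsuf0]
  -- binary search: its result is the greatest feasible value
  have hl : tcost (s[i] - 1) (s.drop i) ≤ k := by
    have h0 : tcost (s[i] - 1) (s.drop i) = 0 := by
      refine tcost_eq_zero (fun e he => ?_)
      have := sorted_drop_le hs hi_lt e he
      omega
    omega
  have hr : ¬ tcost (s[s.length - 1] + k + 1) (s.drop i) ≤ k := by
    have hmem : s[s.length - 1] ∈ s.drop i := by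
      have heq : (s.drop i)[s.length - 1 - i]'(by omega) = s[s.length - 1] := by
        rw [List.getElem_drop]; congr 1; omega
      rw [← heq]; exact List.getElem_mem _
    have hge := tcost_ge (mid := s[s.length - 1] + k + 1) hmem
    intro hc
    omega
  obtain ⟨hFA, hFA1⟩ := bsearch_spec s k i (le_of_lt hi_lt) hk
    ((s[s.length - 1] + k + 1 - s[i]).toNat) s[i] (s[s.length - 1] + k) (le_refl _) hl hr
  set rA : Int := pvBSearch s (i : Int) (s.length : Int) k s[i] (s[s.length - 1] + k)
    ((s[s.length - 1] + k + 1 - s[i]).toNat) with hrAdef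
  -- greedy: its result is the same value
  have hFb : tcost s[i] (s.drop i) ≤ k := by
    have h0 : tcost s[i] (s.drop i) = 0 :=
      tcost_eq_zero (fun e he => sorted_drop_le hs hi_lt e he)
    omega
  have hfold := fold_inv (suf := s.drop i) hsufs hk hFA hFA1 (s.drop i).length 1 s[i]
    (le_refl 1) (by omega) hFb
  simp only [Nat.cast_one, Nat.sub_self, List.take_zero, List.sum_nil] at hfold
  have hsuf0rA : s[i] ≤ rA := by
    by_contra hc
    push Not at hc
    exact hFA1 (le_trans (tcost_mono (by omega) (s.drop i)) hFb)
  have hjpos : 1 ≤ jstar (s.drop i) rA := by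
    refine jstar_pos hsufne ?_
    rw [List.head_eq_getElem]
    have : (s.drop i)[0]'(by omega) = s[i] := by simp [List.getElem_drop]
    rw [this]
    exact hsuf0rA
  have hres_ge : rA ≤ (((PySem.List.pyRange 1 (((s.drop i).length : Int) + 1) 1).foldl
      (pvGreedyStep (s.drop i) ((s.drop i).length : Int) k) (0, s[i])).2) :=
    hfold.2.2 hjpos
  have hres_le : (((PySem.List.pyRange 1 (((s.drop i).length : Int) + 1) 1).foldl
      (pvGreedyStep (s.drop i) ((s.drop i).length : Int) k) (0, s[i])).2) ≤ rA := by
    by_contra hc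
    push Not at hc
    exact hFA1 (le_trans (tcost_mono (by omega) (s.drop i)) hfold.1)
  omega

-- ===== VERDICT (by name: the statement is the Claim_ definition above) =====
theorem maximizeMedian_spec : Claim_equal_maximizeMedian := by
  unfold Claim_equal_maximizeMedian
  intro arr k _hdom hpre
  obtain ⟨hne, hk⟩ := hpre
  unfold Spec_maximizeMedian
  simp only [maximizeMedian, maximizeMedian_alt]
  have hsne : PySem.List.sorted arr (fun x => x) false ≠ [] := by
    rw [Ne, PySem.List.sorted_eq_nil_iff]; exact hne
  have hs : (PySem.List.sorted arr (fun x => x) false).Pairwise (· ≤ ·) := by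
    simpa using PySem.List.sorted_pairwise arr (fun x => x)
  rw [core (PySem.List.sorted arr (fun x => x) false) k hs hsne hk]
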